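-- pv_equiv track=rewrite | github.com/amikht/Star-Generator | stargen.py | does_skip_hit_all_points
-- ===== SOURCE A (Python) =====
-- def does_skip_hit_all_points(coords, skip):
--     """
--     return True if skipping x coordinates results in all coordinates being
--     touched. 1 < skip < len(coords) / 2
--     """
--     coords_touched = [False for i in range(len(coords))]
--     num_points = len(coords)
--     i = 0
--     while coords_touched[i%num_points] == False:
--         coords_touched[i%num_points] = True
--         i += skip+1
--
--     # If there are any untouched points left, return false
--     return not list(filter(lambda x: x==False, coords_touched))
-- ===== SOURCE B (Python) =====
-- def does_skip_hit_all_points(coords, skip):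
--     """
--     return True if skipping x coordinates results in all coordinates being
--     touched. 1 < skip < len(coords) / 2
--
--     Stepping by skip+1 around a cycle of n points visits exactly the
--     multiples of gcd(n, skip+1), so it hits every point iff that gcd is 1.
--     Euclid's algorithm, O(log n) instead of simulating the walk.
--     """
--     n = len(coords)
--     step = abs(skip + 1)
--     while step > 0:
--         n, step = step, n % step
--     return n == 1
-- ===== Notes on version B (the rewrite author's own statement) =====
-- stated objective: faster
-- what changed: Instead of simulating the cyclic walk with a boolean visited array until the first revisit, B computes gcd(len(coords), skip+1) with Euclid's algorithm and returns whether it is 1.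
import Mathlib
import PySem

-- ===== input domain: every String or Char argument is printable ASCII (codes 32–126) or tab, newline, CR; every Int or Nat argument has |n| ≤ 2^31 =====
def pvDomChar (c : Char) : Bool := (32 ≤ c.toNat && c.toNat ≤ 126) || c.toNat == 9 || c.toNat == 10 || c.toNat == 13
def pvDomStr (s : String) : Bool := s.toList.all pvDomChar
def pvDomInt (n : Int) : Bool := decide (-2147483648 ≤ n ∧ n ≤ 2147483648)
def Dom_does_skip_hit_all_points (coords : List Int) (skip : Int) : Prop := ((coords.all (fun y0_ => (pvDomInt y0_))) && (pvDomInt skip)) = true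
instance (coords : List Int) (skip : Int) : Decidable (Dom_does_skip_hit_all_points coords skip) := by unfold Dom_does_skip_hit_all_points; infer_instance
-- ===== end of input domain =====

-- B replaces A's O(n) simulation of the cyclic walk by Euclid's gcd: all points are hit iff gcd(len(coords), skip+1) = 1.

-- ===== PORT A =====
-- Python: while coords_touched[i%num_points] == False: mark it True; i += skip+1
-- fuel only makes the loop total: each iteration flips one False entry, so (list length)+1 checks always suffice
def pvLoopA : Nat → List Bool → Int → Int → List Bool
  | 0, touched, _, _ => touched
  | fuel+1, touched, i, s =>
    if touched.length = 0 then touched   -- Python raises ZeroDivisionError here (i % 0); excluded by Pre_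
    else if touched.getD (PySem.Int.mod i (touched.length : Int)).toNat true = false then
      pvLoopA fuel (touched.set (PySem.Int.mod i (touched.length : Int)).toNat true) (i + s) s
    else touched

def does_skip_hit_all_points (coords : List Int) (skip : Int) : Bool :=
  -- coords_touched = [False for i in range(len(coords))]
  let coords_touched := (List.range coords.length).map (fun _ => false)
  -- the while loop, starting at i = 0, incrementing by skip+1
  let final := pvLoopA (coords_touched.length + 1) coords_touched 0 (skip + 1)
  -- return not list(filter(lambda x: x==False, coords_touched))
  (final.filter (fun x => x == false)).isEmpty

-- ===== PORT B =====
-- while step > 0: n, step = step, n % step   (fuel only makes it total: step strictly decreases)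
def pvGcdLoop : Nat → Int → Int → Int
  | 0, n, _ => n
  | fuel+1, n, step => if 0 < step then pvGcdLoop fuel step (PySem.Int.mod n step) else n

def does_skip_hit_all_points_alt (coords : List Int) (skip : Int) : Bool :=
  let n : Int := coords.length
  let step : Int := |skip + 1|
  decide (pvGcdLoop (step.toNat + 1) n step = 1)

-- ===== PRECONDITION & SPEC =====
-- Pre_ excludes only the empty list, on which Python A raises ZeroDivisionError (i % 0)
def Pre_does_skip_hit_all_points (coords : List Int) (skip : Int) : Prop := coords ≠ []
instance (coords : List Int) (skip : Int) : Decidable (Pre_does_skip_hit_all_points coords skip) := by unfold Pre_does_skip_hit_all_points; infer_instance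
def pvWitness_does_skip_hit_all_points : List Int × Int := ([10, 20, 30], 1)

def Spec_does_skip_hit_all_points (coords : List Int) (skip : Int) (out : Bool) : Prop := out = does_skip_hit_all_points_alt coords skip
instance (coords : List Int) (skip : Int) (out : Bool) : Decidable (Spec_does_skip_hit_all_points coords skip out) := by unfold Spec_does_skip_hit_all_points; infer_instance

-- ===== CLAIM (what is proved, stated in full; the proofs are below) =====
def Claim_equal_does_skip_hit_all_points : Prop := ∀ (coords : List Int) (skip : Int), Dom_does_skip_hit_all_points coords skip → Pre_does_skip_hit_all_points coords skip → Spec_does_skip_hit_all_points coords skip (does_skip_hit_all_points coords skip)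

-- ===== LEMMAS AND PROOFS =====

-- the walk's index sequence, in Nat arithmetic: pvF m r k = (k*r) % m
def pvF (m r k : Nat) : Nat := (k * r) % m
-- visited array after k iterations: entry j is True iff some earlier step landed on j
def pvMark (m : Nat) (f : Nat → Nat) (k : Nat) : List Bool :=
  (List.range m).map (fun j => decide (∃ i, i < k ∧ f i = j))

theorem pvMark_zero (m : Nat) (f : Nat → Nat) :
    pvMark m f 0 = (List.range m).map (fun _ => false) := by
  simp [pvMark]

theorem length_pvMark (m : Nat) (f : Nat → Nat) (k : Nat) : (pvMark m f k).length = m := by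
  simp [pvMark]

theorem getElem_pvMark (m : Nat) (f : Nat → Nat) (k j : Nat) (h : j < (pvMark m f k).length) :
    (pvMark m f k)[j] = decide (∃ i, i < k ∧ f i = j) := by
  simp [pvMark]

theorem getD_pvMark (m : Nat) (f : Nat → Nat) (k j : Nat) (d : Bool) (hj : j < m) :
    (pvMark m f k).getD j d = decide (∃ i, i < k ∧ f i = j) := by
  rw [List.getD_eq_getElem _ d (by simpa [length_pvMark] using hj)]
  exact getElem_pvMark m f k j _

theorem set_pvMark (m : Nat) (f : Nat → Nat) (k : Nat) (hfk : f k < m) :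
    (pvMark m f k).set (f k) true = pvMark m f (k + 1) := by
  apply List.ext_getElem
  · simp [pvMark]
  · intro j h1 h2
    have hj : j < m := by simpa [length_pvMark] using h2
    rw [List.getElem_set, getElem_pvMark m f (k + 1) j h2]
    by_cases hje : f k = j
    · rw [if_pos hje]
      exact (decide_eq_true ⟨k, Nat.lt_succ_self k, hje⟩).symm
    · rw [if_neg hje, getElem_pvMark m f k j (by simpa [length_pvMark] using hj)]
      apply decide_eq_decide.mpr
      constructor
      · rintro ⟨i, hi, rfl⟩; exact ⟨i, Nat.lt_succ_of_lt hi, rfl⟩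
      · rintro ⟨i, hi, rfl⟩
        rcases Nat.lt_succ_iff_lt_or_eq.mp hi with h | h
        · exact ⟨i, h, rfl⟩
        · exact absurd (h ▸ rfl) hje

-- the index Python computes is pvF of the step reduced mod m
theorem pv_idx_eq (m : Nat) (s : Int) (r k : Nat) (hm : 0 < m) (hr : (r : Int) = s % (m : Int)) :
    (PySem.Int.mod ((k : Int) * s) (m : Int)).toNat = pvF m r k := by
  have hM : (0 : Int) < (m : Int) := by exact_mod_cast hm
  rw [PySem.Int.mod_eq_emod_of_pos hM]
  have h3 : ((k : Int) * s) % (m : Int) = ((k : Int) * (r : Int)) % (m : Int) := by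
    rw [Int.mul_emod ((k : Int)) s, Int.mul_emod ((k : Int)) ((r : Int)), hr,
      Int.emod_emod_of_dvd s dvd_rfl]
  have h4 : ((k : Int) * (r : Int)) % (m : Int) = ((k * r % m : Nat) : Int) := by
    push_cast; ring_nf
  rw [h3, h4]
  unfold pvF
  omega

theorem pvF_lt (m r k : Nat) (hm : 0 < m) : pvF m r k < m := Nat.mod_lt _ hm

theorem pvF_dvd (m r k : Nat) : Nat.gcd m r ∣ pvF m r k :=
  (Nat.dvd_mod_iff (Nat.gcd_dvd_left m r)).mpr (Dvd.dvd.mul_left (Nat.gcd_dvd_right m r) k)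

theorem pvF_period (m r : Nat) : pvF m r (m / Nat.gcd m r) = 0 := by
  unfold pvF
  obtain ⟨r', hr'⟩ := Nat.gcd_dvd_right m r
  have h1 : m / Nat.gcd m r * r = m / Nat.gcd m r * Nat.gcd m r * r' := by
    rw [Nat.mul_assoc, ← hr']
  by_cases h : Nat.gcd m r = 0
  · have hm0 : m = 0 := Nat.eq_zero_of_gcd_eq_zero_left h
    simp [hm0]
  · have h2 : m / Nat.gcd m r * Nat.gcd m r = m := Nat.div_mul_cancel (Nat.gcd_dvd_left m r)
    rw [h1, h2, Nat.mul_mod_right]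

theorem pvF_inj (m r a b : Nat) (hm : 0 < m) (hab : a < b) (hb : b < m / Nat.gcd m r) :
    pvF m r a ≠ pvF m r b := by
  intro heq
  have hgpos : 0 < Nat.gcd m r := Nat.gcd_pos_of_pos_left r hm
  have hmod : a * r ≡ b * r [MOD m] := heq
  have hle : a * r ≤ b * r := Nat.mul_le_mul_right r (Nat.le_of_lt hab)
  have hdvd : m ∣ b * r - a * r := (Nat.modEq_iff_dvd' hle).mp hmod
  have hsub : b * r - a * r = (b - a) * r := by rw [Nat.sub_mul]
  rw [hsub] at hdvd
  have hco : (m / Nat.gcd m r).Coprime (r / Nat.gcd m r) := Nat.coprime_div_gcd_div_gcd hgpos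
  have e1 : ((b - a) * (r / Nat.gcd m r)) * Nat.gcd m r = (b - a) * r := by
    rw [Nat.mul_assoc, Nat.div_mul_cancel (Nat.gcd_dvd_right m r)]
  have e2 : (m / Nat.gcd m r) * Nat.gcd m r = m := Nat.div_mul_cancel (Nat.gcd_dvd_left m r)
  have hdvd2 : (m / Nat.gcd m r) ∣ (b - a) * (r / Nat.gcd m r) :=
    (mul_dvd_mul_iff_right (by omega : Nat.gcd m r ≠ 0)).mp (by rw [e1, e2]; exact hdvd)
  have hdvd3 : (m / Nat.gcd m r) ∣ (b - a) := hco.dvd_of_dvd_mul_right hdvd2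
  have : m / Nat.gcd m r ≤ b - a := Nat.le_of_dvd (by omega) hdvd3
  omega

theorem pvF_surj (m r j : Nat) (hm : 0 < m) (hg : Nat.gcd m r = 1) (hj : j < m) :
    ∃ k, k < m ∧ pvF m r k = j := by
  have hinj : Set.InjOn (pvF m r) (Finset.range m) := by
    intro a ha b hb hab
    simp only [Finset.coe_range, Set.mem_Iio] at ha hb
    rcases Nat.lt_trichotomy a b with h | h | h
    · exact absurd hab (pvF_inj m r a b hm h (by rw [hg, Nat.div_one]; exact hb))
    · exact h
    · exact absurd hab.symm (pvF_inj m r b a hm h (by rw [hg, Nat.div_one]; exact ha))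
  have hsub : (Finset.range m).image (pvF m r) ⊆ Finset.range m := by
    intro x hx
    rcases Finset.mem_image.mp hx with ⟨k, _, rfl⟩
    exact Finset.mem_range.mpr (pvF_lt m r k hm)
  have hcard : ((Finset.range m).image (pvF m r)).card = m := by
    rw [Finset.card_image_of_injOn hinj, Finset.card_range]
  have heq : (Finset.range m).image (pvF m r) = Finset.range m :=
    Finset.eq_of_subset_of_card_le hsub (by rw [hcard, Finset.card_range])
  have hjmem : j ∈ (Finset.range m).image (pvF m r) := by
    rw [heq]; exact Finset.mem_range.mpr hj
  rcases Finset.mem_image.mp hjmem with ⟨k, hk, hfk⟩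
  exact ⟨k, Finset.mem_range.mp hk, hfk⟩

-- the loop, started on the k-th state, finishes on the P-th state (P = m / gcd m r)
theorem pvLoopA_mark (m : Nat) (s : Int) (r : Nat) (hm : 0 < m) (hr : (r : Int) = s % (m : Int)) :
    ∀ (fuel k : Nat), k ≤ m / Nat.gcd m r → m / Nat.gcd m r - k < fuel →
      pvLoopA fuel (pvMark m (pvF m r) k) ((k : Int) * s) s
        = pvMark m (pvF m r) (m / Nat.gcd m r) := by
  have hP1 : 1 ≤ m / Nat.gcd m r := Nat.div_pos (Nat.le_of_dvd hm (Nat.gcd_dvd_left m r))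
    (Nat.gcd_pos_of_pos_left r hm)
  intro fuel
  induction fuel with
  | zero => intro k _ h; omega
  | succ fuel ih =>
    intro k hk hfuel
    rw [pvLoopA]
    rw [length_pvMark]
    rw [if_neg (by omega)]
    rw [pv_idx_eq m s r k hm hr]
    rw [getD_pvMark m (pvF m r) k (pvF m r k) true (pvF_lt m r k hm)]
    rcases Nat.lt_or_ge k (m / Nat.gcd m r) with hkP | hkP
    · -- current cell unvisited: mark it, step on
      have hfresh : ¬ (∃ i, i < k ∧ pvF m r i = pvF m r k) := by
        rintro ⟨i, hi, hieq⟩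
        exact pvF_inj m r i k hm hi hkP hieq
      rw [decide_eq_false hfresh, if_pos rfl]
      rw [set_pvMark m (pvF m r) k (pvF_lt m r k hm)]
      have harith : (k : Int) * s + s = ((k + 1 : Nat) : Int) * s := by push_cast; ring
      rw [harith]
      exact ih (k + 1) (by omega) (by omega)
    · -- k = P: the walk has closed the cycle (pvF P = 0 = pvF 0), so the loop stops
      have hkeq : k = m / Nat.gcd m r := le_antisymm hk hkP
      subst hkeq
      have hvisited : ∃ i, i < m / Nat.gcd m r ∧ pvF m r i = pvF m r (m / Nat.gcd m r) := by
        refine ⟨0, by omega, ?_⟩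
        rw [pvF_period m r]
        simp [pvF]
      rw [decide_eq_true hvisited, if_neg (by simp)]

-- the visited array is all-True exactly when the first k steps cover every index
theorem pv_allTrue (m : Nat) (f : Nat → Nat) (k : Nat) :
    ((pvMark m f k).filter (fun x => x == false)).isEmpty = true
      ↔ (∀ j, j < m → ∃ i, i < k ∧ f i = j) := by
  rw [List.isEmpty_iff, List.filter_eq_nil_iff]
  constructor
  · intro hall j hj
    have hmem : decide (∃ i, i < k ∧ f i = j) ∈ pvMark m f k := by
      unfold pvMark
      exact List.mem_map.mpr ⟨j, List.mem_range.mpr hj, rfl⟩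
    have h := hall _ hmem
    simpa using h
  · intro hall x hx
    unfold pvMark at hx
    rcases List.mem_map.mp hx with ⟨j, hj, rfl⟩
    simpa using hall j (List.mem_range.mp hj)

-- Euclid's loop computes Int.gcd (for nonnegative arguments and enough fuel)
theorem pvGcdLoop_gcd : ∀ (fuel : Nat) (n step : Int), 0 ≤ n → 0 ≤ step → step.toNat < fuel →
    pvGcdLoop fuel n step = (Int.gcd n step : Int) := by
  intro fuel
  induction fuel with
  | zero => intro n step _ _ h; omega
  | succ fuel ih =>
    intro n step hn hstep hfuel
    rw [pvGcdLoop]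
    by_cases hpos : 0 < step
    · rw [if_pos hpos, PySem.Int.mod_eq_emod_of_pos hpos]
      have h1 : 0 ≤ n % step := Int.emod_nonneg n (by omega)
      have h2 : n % step < step := Int.emod_lt_of_pos n hpos
      rw [ih step (n % step) (by omega) h1 (by omega)]
      congr 1
      rw [Int.gcd_comm step (n % step), Int.gcd_emod n step, Int.gcd_comm n step]
    · rw [if_neg hpos]
      have hz : step = 0 := by omega
      subst hz
      simp [Int.gcd, Int.natAbs_of_nonneg hn]

-- bridging the two gcds: gcd m |s| = gcd m (s mod m)  (as Nats)
theorem pv_gcd_bridge (m : Nat) (s : Int) (hm : 0 < m) :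
    Int.gcd (m : Int) |s| = Nat.gcd m ((s % (m : Int)).toNat) := by
  have hM : ((m : Int)) ≠ 0 := by exact_mod_cast Nat.pos_iff_ne_zero.mp hm
  have h1 : Int.gcd (m : Int) |s| = Int.gcd (m : Int) s := by
    unfold Int.gcd
    rw [Int.natAbs_abs]
  have hr0 : (0 : Int) ≤ s % (m : Int) := Int.emod_nonneg s hM
  have h2 : Int.gcd (m : Int) s = Int.gcd (m : Int) (s % (m : Int)) := by
    rw [Int.gcd_comm (m : Int) s, ← Int.gcd_emod s (m : Int), Int.gcd_comm]
  rw [h1, h2, ← Int.toNat_of_nonneg hr0]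
  exact Int.gcd_natCast_natCast m _

theorem does_skip_hit_all_points_main (coords : List Int) (skip : Int) (h : coords ≠ []) :
    does_skip_hit_all_points coords skip = does_skip_hit_all_points_alt coords skip := by
  have hm : 0 < coords.length := List.length_pos_iff.mpr h
  have hr0 : (0 : Int) ≤ (skip + 1) % (coords.length : Int) :=
    Int.emod_nonneg _ (by exact_mod_cast Nat.pos_iff_ne_zero.mp hm)
  set m := coords.length with hmdef
  set r : Nat := ((skip + 1) % (m : Int)).toNat with hrdef
  have hr : (r : Int) = (skip + 1) % (m : Int) := Int.toNat_of_nonneg hr0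
  have hgpos : 0 < Nat.gcd m r := Nat.gcd_pos_of_pos_left r hm
  have hgm : Nat.gcd m r ≤ m := Nat.le_of_dvd hm (Nat.gcd_dvd_left m r)
  -- evaluate port A to the final visited array
  have hA : does_skip_hit_all_points coords skip
      = ((pvMark m (pvF m r) (m / Nat.gcd m r)).filter (fun x => x == false)).isEmpty := by
    show ((pvLoopA (((List.range m).map (fun _ => false)).length + 1)
        ((List.range m).map (fun _ => false)) 0 (skip + 1)).filter (fun x => x == false)).isEmpty = _
    rw [← pvMark_zero m (pvF m r), length_pvMark]
    rw [show (0 : Int) = ((0 : Nat) : Int) * (skip + 1) by simp]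
    rw [pvLoopA_mark m (skip + 1) r hm hr (m + 1) 0 (Nat.zero_le _)
      (by simpa using Nat.lt_succ_of_le (Nat.div_le_self m (Nat.gcd m r)))]
  -- evaluate port B to a statement about the gcd
  have hB : does_skip_hit_all_points_alt coords skip = decide (Nat.gcd m r = 1) := by
    show decide (pvGcdLoop (|skip + 1|.toNat + 1) (m : Int) |skip + 1| = 1) = _
    rw [pvGcdLoop_gcd (|skip + 1|.toNat + 1) (m : Int) |skip + 1|
      (by exact_mod_cast Nat.zero_le m) (abs_nonneg _) (by omega)]
    rw [pv_gcd_bridge m (skip + 1) hm, ← hrdef]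
    simp
  rw [hA, hB, Bool.eq_iff_iff, pv_allTrue, decide_eq_true_iff]
  constructor
  · -- every point visited forces the gcd to divide 1
    intro hall
    by_contra hg1
    have hm2 : 2 ≤ m := by omega
    rcases hall 1 (by omega) with ⟨i, _, hieq⟩
    have hdvd := pvF_dvd m r i
    rw [hieq] at hdvd
    have := Nat.le_of_dvd one_pos hdvd
    omega
  · -- gcd 1: the walk is surjective
    intro hg1 j hj
    rcases pvF_surj m r j hm hg1 hj with ⟨k, hk, hfk⟩
    exact ⟨k, by rw [hg1, Nat.div_one]; exact hk, hfk⟩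

-- ===== VERDICT (by name: the statement is the Claim_ definition above) =====
theorem does_skip_hit_all_points_spec : Claim_equal_does_skip_hit_all_points := by
  intro coords skip _ hpre
  exact does_skip_hit_all_points_main coords skip hpre
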